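-- pv_equiv track=rewrite | github.com/Igor7086/Less4 | Less4_5_3.py | fix_start
-- ===== SOURCE A (Python) =====
-- def fix_start(s):
--     ss = s[0]
--     for i in range(len(s)-1):
--         if s[i+1] in ss:
--             ss += '*'
--         else:
--             ss += s[i+1]
--     return ss
-- ===== SOURCE B (Python) =====
-- def fix_start(s):
--     first = {}
--     for i, c in enumerate(s):
--         first.setdefault(c, i)
--     return ''.join(c if first[c] == i else '*' for i, c in enumerate(s))
-- ===== Notes on version B (the rewrite author's own statement) =====
-- stated objective: alternative
-- what changed: B builds a first-occurrence index table in one pass and then generates the output in a second independent pass, instead of A's single fused pass that substring-tests each character against the growing result string.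
-- outside the precondition, e.g. on fix_start(''): A raises IndexError, B returns ''
import Mathlib
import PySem

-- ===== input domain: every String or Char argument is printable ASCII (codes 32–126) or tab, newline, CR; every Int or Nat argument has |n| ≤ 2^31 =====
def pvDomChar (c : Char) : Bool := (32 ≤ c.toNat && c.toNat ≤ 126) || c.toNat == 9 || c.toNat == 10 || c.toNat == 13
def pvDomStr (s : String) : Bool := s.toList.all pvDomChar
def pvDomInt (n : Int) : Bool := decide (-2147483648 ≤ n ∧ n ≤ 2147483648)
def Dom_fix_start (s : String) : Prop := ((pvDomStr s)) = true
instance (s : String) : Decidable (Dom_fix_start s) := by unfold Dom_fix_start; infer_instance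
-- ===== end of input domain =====

-- B replaces A's fused accumulate-and-test pass by a first-occurrence index table plus an
-- independent output-generation pass (alternative decomposition, same results).

-- ===== PORT A =====
def fix_start (s : String) : String :=
  let l := s.toList
  match PySem.List.pyGet? l 0 with
  | none => ""   -- Python: s[0] raises IndexError here; excluded by Pre_fix_start
  | some c0 =>
      String.ofList ((PySem.List.pyRange 0 ((l.length : Int) - 1) 1).foldl
        (fun ss i =>
          let ci := PySem.List.pyGetD l (i + 1) ' '   -- s[i+1]; i+1 is always in range here
          if PySem.Chars.isIn [ci] ss then ss ++ ['*'] else ss ++ [ci]) [c0])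

-- ===== PORT B =====
def fix_start_alt (s : String) : String :=
  let l := s.toList
  let first := (PySem.List.enumerate l 0).foldl
    (fun d (p : Int × Char) => PySem.Dict.setdefault d p.2 p.1)
    (PySem.Dict.empty : PySem.Dict Char Int)
  -- first[c]: the key is always present (every c of s was fed to setdefault), so getD is exact
  String.ofList ((PySem.List.enumerate l 0).map
    (fun p : Int × Char => if PySem.Dict.getD first p.2 (-1) = p.1 then p.2 else '*'))

-- ===== PRECONDITION & SPEC =====
-- Pre_ excludes exactly the empty string, on which A's s[0] raises IndexError.
def Pre_fix_start (s : String) : Prop := s ≠ ""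
instance (s : String) : Decidable (Pre_fix_start s) := by unfold Pre_fix_start; infer_instance
def pvWitness_fix_start : String := "abcab*c"

def Spec_fix_start (s : String) (out : String) : Prop := out = fix_start_alt s
instance (s : String) (out : String) : Decidable (Spec_fix_start s out) := by unfold Spec_fix_start; infer_instance

-- ===== CLAIM (what is proved, stated in full; the proofs are below) =====
def Claim_equal_fix_start : Prop := ∀ (s : String), Dom_fix_start s → Pre_fix_start s → Spec_fix_start s (fix_start s)

-- ===== LEMMAS AND PROOFS =====

-- the common specification both ports are reduced to: keep a char iff it is not in the seen prefix
def specGo (seen : List Char) : List Char → List Char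
  | [] => []
  | c :: t => (if c ∈ seen then '*' else c) :: specGo (seen ++ [c]) t

lemma isIn_singleton (c : Char) (l : List Char) :
    PySem.Chars.isIn [c] l = true ↔ c ∈ l := by
  rw [PySem.Chars.isIn_iff_infix]
  constructor
  · intro h; exact h.mem (by simp)
  · intro h
    obtain ⟨u, v, rfl⟩ := List.mem_iff_append.mp h
    exact ⟨u, v, by simp⟩

-- A's loop with an accumulator whose non-'*' members are exactly the seen chars equals specGo
lemma A_fold (t : List Char) : ∀ (acc seen : List Char),
    (∀ x, x ≠ '*' → (x ∈ acc ↔ x ∈ seen)) →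
    t.foldl (fun ss ci => if PySem.Chars.isIn [ci] ss then ss ++ ['*'] else ss ++ [ci]) acc
      = acc ++ specGo seen t := by
  induction t with
  | nil => intro acc seen _; simp [specGo]
  | cons c t ih =>
    intro acc seen hinv
    simp only [List.foldl_cons, specGo]
    by_cases hc : c = '*'
    · subst hc
      rw [ite_self]
      rw [ih (acc ++ ['*']) (seen ++ ['*']) (by intro x hx; simp [hinv x hx, hx])]
      simp
    · have hms : c ∈ acc ↔ c ∈ seen := hinv c hc
      by_cases hseen : c ∈ seen
      · rw [if_pos ((isIn_singleton c acc).mpr (hms.mpr hseen)), if_pos hseen]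
        rw [ih (acc ++ ['*']) (seen ++ [c]) ?_]
        · simp
        · intro x hx
          constructor
          · intro hxm
            have hxa : x ∈ acc := by
              rcases List.mem_append.mp hxm with h | h
              · exact h
              · simp at h; exact absurd h hx
            exact List.mem_append.mpr (Or.inl ((hinv x hx).mp hxa))
          · intro hxm
            rcases List.mem_append.mp hxm with h | h
            · exact List.mem_append.mpr (Or.inl ((hinv x hx).mpr h))
            · simp at h; subst h
              exact List.mem_append.mpr (Or.inl ((hinv x hx).mpr hseen))
      · rw [if_neg (by rw [isIn_singleton]; exact fun h => hseen (hms.mp h)), if_neg hseen]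
        rw [ih (acc ++ [c]) (seen ++ [c]) (by intro x hx; simp [hinv x hx])]
        simp

-- the setdefault loop computes the first-occurrence index of every key
lemma dict_inv (t : List Char) : ∀ (i0 : Int) (d : PySem.Dict Char Int) (x : Char),
    (((PySem.List.enumerate t i0).foldl
        (fun d (p : Int × Char) => PySem.Dict.setdefault d p.2 p.1) d).get? x)
      = (d.get? x).or ((t.idxOf? x).map (fun k => i0 + (k : Int))) := by
  induction t with
  | nil => intro i0 d x; simp [PySem.List.enumerate_nil, List.idxOf?]
  | cons c t ih =>
    intro i0 d x
    rw [PySem.List.enumerate_cons]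
    simp only [List.foldl_cons]
    rw [ih, List.idxOf?_cons]
    by_cases hx : x = c
    · subst hx
      rw [PySem.Dict.get?_setdefault_self, if_pos (by simp)]
      cases hgd : d.get? x with
      | none => simp [Option.or]
      | some v => simp [Option.or]
    · rw [PySem.Dict.get?_setdefault_of_ne d i0 hx,
          if_neg (by simp; exact fun h => hx h.symm)]
      cases h : List.idxOf? x t with
      | none => simp
      | some k =>
        cases d.get? x with
        | none => simp [Option.or]; ring
        | some v => simp [Option.or]

-- B's output pass equals specGo, given the first-occurrence dict of the whole list
lemma B_map (l : List Char) (first : PySem.Dict Char Int)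
    (hfirst : ∀ x, first.get? x = (l.idxOf? x).map (fun k => (k : Int))) :
    ∀ (t u : List Char), l = u ++ t →
      (PySem.List.enumerate t (u.length : Int)).map
        (fun p : Int × Char => if PySem.Dict.getD first p.2 (-1) = p.1 then p.2 else '*')
        = specGo u t := by
  intro t
  induction t with
  | nil => intro u _; simp [PySem.List.enumerate_nil, specGo]
  | cons c t ih =>
    intro u hl
    rw [PySem.List.enumerate_cons]
    simp only [List.map_cons, specGo]
    have hmem : c ∈ l := by rw [hl]; simp
    have hsome : (PySem.List.index? l c).isSome = true :=
      (PySem.List.index?_isSome_iff l c).mpr hmem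
    obtain ⟨k, hk⟩ := Option.isSome_iff_exists.mp hsome
    have hval : PySem.Dict.getD first c (-1) = (k : Int) := by
      rw [PySem.Dict.getD_eq_get?_getD, hfirst, ← PySem.List.index?_eq_idxOf?, hk]
      rfl
    have hcond : (PySem.Dict.getD first c (-1) = (u.length : Int)) ↔ c ∉ u := by
      rw [hval]
      constructor
      · intro hkeq
        have hk' : k = u.length := by exact_mod_cast hkeq
        obtain ⟨pre, suf, hps, hlen, hnot⟩ := (PySem.List.index?_eq_some_iff l c k).mp hk
        have heq : pre ++ c :: suf = u ++ c :: t := by rw [← hps, hl]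
        have : pre = u := (List.append_inj heq (hlen.trans hk')).1
        exact this ▸ hnot
      · intro hnu
        have : PySem.List.index? l c = some u.length :=
          (PySem.List.index?_eq_some_iff l c u.length).mpr ⟨u, t, hl, rfl, hnu⟩
        rw [hk] at this
        exact_mod_cast Option.some.inj this
    have htail : (PySem.List.enumerate t ((u.length : Int) + 1)).map
        (fun p : Int × Char => if PySem.Dict.getD first p.2 (-1) = p.1 then p.2 else '*')
        = specGo (u ++ [c]) t := by
      have := ih (u ++ [c]) (by simpa using hl)
      simpa using this
    by_cases hcu : c ∈ u
    · rw [if_pos hcu]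
      rw [if_neg (by rw [hcond]; simp [hcu])]
      rw [htail]
    · rw [if_neg hcu, if_pos (hcond.mpr hcu), htail]

-- ===== VERDICT (by name: the statement is the Claim_ definition above) =====
theorem fix_start_spec : Claim_equal_fix_start := by
  intro s _ hpre
  show fix_start s = fix_start_alt s
  obtain ⟨c, t, hct⟩ : ∃ c t, s.toList = c :: t := by
    cases h : s.toList with
    | nil =>
      exact absurd (by simpa using congrArg String.ofList h) hpre
    | cons c t => exact ⟨c, t, rfl⟩
  -- A side
  have hA : fix_start s = String.ofList (c :: specGo [c] t) := by
    simp only [fix_start, hct, PySem.List.pyGet?_zero_cons]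
    congr 1
    have hlen : ((c :: t).length : Int) - 1 = ((t.length : Nat) : Int) := by
      simp
    rw [hlen]
    refine Eq.trans (PySem.List.foldl_congr_mem _ _
        (fun ss i => if PySem.Chars.isIn [PySem.List.pyGetD t i ' '] ss
                     then ss ++ ['*'] else ss ++ [PySem.List.pyGetD t i ' ']) _ ?_) ?_
    · intro acc i hi
      have h0 : 0 ≤ i := (PySem.List.mem_pyRange_one.mp hi).1
      have hget : PySem.List.pyGetD (c :: t) (i + 1) ' ' = PySem.List.pyGetD t i ' ' := by
        have hi' : i = ((i.toNat : Nat) : Int) := (Int.toNat_of_nonneg h0).symm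
        rw [hi']
        have h1 : ((i.toNat : Nat) : Int) + 1 = ((i.toNat + 1 : Nat) : Int) := by push_cast; ring
        rw [h1, PySem.List.pyGetD_natCast, PySem.List.pyGetD_natCast, List.getD_cons_succ]
      simp only [hget]
    · rw [PySem.List.foldl_pyRange_zero_pyGetD' t ' '
        (fun ss ci => if PySem.Chars.isIn [ci] ss then ss ++ ['*'] else ss ++ [ci]) [c]]
      exact A_fold t [c] [c] (fun x _ => Iff.rfl)
  -- B side
  have hfirst : ∀ x, ((PySem.List.enumerate s.toList 0).foldl
      (fun d (p : Int × Char) => PySem.Dict.setdefault d p.2 p.1)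
      (PySem.Dict.empty : PySem.Dict Char Int)).get? x
        = (s.toList.idxOf? x).map (fun k => (k : Int)) := by
    intro x
    rw [dict_inv s.toList 0 PySem.Dict.empty x]
    cases h : s.toList.idxOf? x <;> simp [Option.or]
  have hB : fix_start_alt s = String.ofList (specGo [] s.toList) := by
    simp only [fix_start_alt]
    congr 1
    have := B_map s.toList _ hfirst s.toList [] rfl
    simpa using this
  rw [hA, hB, hct]
  simp [specGo]
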